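-- pv_equiv track=rewrite | github.com/ValterMed/dynamic_programming_challenge | challenge.py | calcular_valores
-- ===== SOURCE A (Python) =====
-- def calcular_valores(casos):
--     resultados = []
--     for n, monedas in casos:
--         valor_posible = set()
--         for moneda in monedas:
--             nuevo_valor = set(v + moneda for v in valor_posible)
--             nuevo_valor.add(moneda)
--             valor_posible |= nuevo_valor
--         resultados.append(len(valor_posible))
--     return resultados
-- ===== SOURCE B (Python) =====
-- def _sums(coins):
--     # nonempty subset sums, by divide and conquer on the coin list
--     if not coins:
--         return set()
--     if len(coins) == 1:
--         return set(coins)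
--     mid = len(coins) // 2
--     izq = _sums(coins[:mid])
--     der = _sums(coins[mid:])
--     return izq | der | {a + b for a in izq for b in der}
--
-- def calcular_valores(casos):
--     resultados = []
--     for n, monedas in casos:
--         resultados.append(len(_sums(monedas)))
--     return resultados
-- ===== Notes on version B (the rewrite author's own statement) =====
-- stated objective: alternative
-- what changed: Replaces A's left-to-right fold that extends one growing set per coin with a divide-and-conquer recursion: subset sums of each half are computed independently and combined as L, R and all pairwise sums L+R.
import Mathlib
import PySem

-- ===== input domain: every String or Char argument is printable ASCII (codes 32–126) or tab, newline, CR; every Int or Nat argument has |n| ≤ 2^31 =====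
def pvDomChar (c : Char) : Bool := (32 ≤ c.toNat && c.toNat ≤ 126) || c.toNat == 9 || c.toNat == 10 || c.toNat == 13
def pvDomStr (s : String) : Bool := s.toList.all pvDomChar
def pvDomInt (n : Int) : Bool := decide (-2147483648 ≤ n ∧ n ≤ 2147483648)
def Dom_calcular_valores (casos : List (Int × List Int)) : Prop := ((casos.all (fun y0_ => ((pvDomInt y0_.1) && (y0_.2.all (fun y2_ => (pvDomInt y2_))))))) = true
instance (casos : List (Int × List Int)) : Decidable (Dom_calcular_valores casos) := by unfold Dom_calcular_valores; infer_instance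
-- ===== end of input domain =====

-- B replaces A's left-to-right fold growing one set per coin by a divide-and-conquer
-- recursion combining the subset sums of the two halves (alternative decomposition,
-- same cost order).

-- ===== PORT A =====
-- body of A's inner `for moneda in monedas` loop
def pvAStep (valor_posible : PySem.Set Int) (moneda : Int) : PySem.Set Int :=
  let nuevo_valor := PySem.Set.ofList (valor_posible.map (fun v => v + moneda))
  let nuevo_valor := PySem.Set.add nuevo_valor moneda
  PySem.Set.union valor_posible nuevo_valor

-- A's inner loop: valor_posible over one case's coins
def pvACase (monedas : List Int) : PySem.Set Int :=
  monedas.foldl pvAStep PySem.Set.empty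

def calcular_valores (casos : List (Int × List Int)) : List Int :=
  casos.foldl (fun resultados c => resultados ++ [PySem.Set.len (pvACase c.2)]) []

-- ===== PORT B =====
-- len(coins) // 2 (used by the port's termination proof)
lemma pvMid (l : Nat) : PySem.Int.floordiv (l : Int) 2 = ((l / 2 : Nat) : Int) := by
  exact_mod_cast PySem.Int.floordiv_natCast l 2

-- B's helper `_sums`: nonempty subset sums by divide and conquer
def pvSums (coins : List Int) : PySem.Set Int :=
  if h0 : coins = [] then PySem.Set.empty
  else if h1 : coins.length = 1 then PySem.Set.ofList coins
  else
    let mid : Int := PySem.Int.floordiv (coins.length : Int) 2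
    let izq := pvSums (PySem.List.slice coins none (some mid))
    let der := pvSums (PySem.List.slice coins (some mid) none)
    PySem.Set.union (PySem.Set.union izq der)
      (PySem.Set.ofList (izq.flatMap (fun a => der.map (fun b => a + b))))
termination_by coins.length
decreasing_by
  · have hlen : coins.length ≠ 0 := mt List.length_eq_zero_iff.mp h0
    simp only [pvMid, PySem.List.slice_to_natCast, List.length_take]
    omega
  · have hlen : coins.length ≠ 0 := mt List.length_eq_zero_iff.mp h0
    simp only [pvMid, PySem.List.slice_from_natCast, List.length_drop]
    omega

def calcular_valores_alt (casos : List (Int × List Int)) : List Int :=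
  casos.foldl (fun resultados c => resultados ++ [PySem.Set.len (pvSums c.2)]) []

-- ===== PRECONDITION & SPEC =====
def Spec_calcular_valores (casos : List (Int × List Int)) (out : List Int) : Prop := out = calcular_valores_alt casos
instance (casos : List (Int × List Int)) (out : List Int) : Decidable (Spec_calcular_valores casos out) := by unfold Spec_calcular_valores; infer_instance

-- ===== CLAIM (what is proved, stated in full; the proofs are below) =====
def Claim_equal_calcular_valores : Prop := ∀ (casos : List (Int × List Int)), Dom_calcular_valores casos → Spec_calcular_valores casos (calcular_valores casos)

-- ===== LEMMAS AND PROOFS =====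

lemma pvMemStepA (S : PySem.Set Int) (m x : Int) :
    x ∈ pvAStep S m ↔ x ∈ S ∨ (x - m) ∈ S ∨ x = m := by
  simp only [pvAStep, PySem.Set.mem_union, PySem.Set.mem_add, PySem.Set.mem_ofList,
    List.mem_map]
  constructor
  · rintro (h | ⟨v, hv, rfl⟩ | rfl)
    · exact Or.inl h
    · exact Or.inr (Or.inl (by simpa using hv))
    · exact Or.inr (Or.inr rfl)
  · rintro (h | h | rfl)
    · exact Or.inl h
    · exact Or.inr (Or.inl ⟨x - m, h, by ring⟩)
    · exact Or.inr (Or.inr rfl)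

-- membership in A's fold: an optional nonempty choice of later coins on top of S
lemma pvMem_fold (ms : List Int) : ∀ (S : PySem.Set Int) (x : Int),
    x ∈ ms.foldl pvAStep S ↔
      x ∈ S ∨ ∃ ys : List Int, ys.Sublist ms ∧ ys ≠ [] ∧ (ys.sum = x ∨ x - ys.sum ∈ S) := by
  induction ms with
  | nil =>
    intro S x
    simp [List.sublist_nil]
  | cons m rest ih =>
    intro S x
    rw [List.foldl_cons, ih]
    constructor
    · rintro (hx | ⟨ys, hs, hne, hcase⟩)
      · rw [pvMemStepA] at hx
        rcases hx with hx | hx | rfl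
        · exact Or.inl hx
        · exact Or.inr ⟨[m], List.Sublist.cons₂ m (List.nil_sublist rest), by simp,
            Or.inr (by simpa using hx)⟩
        · exact Or.inr ⟨[x], List.Sublist.cons₂ x (List.nil_sublist rest), by simp,
            Or.inl (by simp)⟩
      · rcases hcase with hsum | hmem
        · exact Or.inr ⟨ys, hs.cons m, hne, Or.inl hsum⟩
        · rw [pvMemStepA] at hmem
          rcases hmem with hmem | hmem | hmem
          · exact Or.inr ⟨ys, hs.cons m, hne, Or.inr hmem⟩
          · refine Or.inr ⟨m :: ys, List.Sublist.cons₂ m hs, by simp, Or.inr ?_⟩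
            rw [List.sum_cons]
            have : x - (m + ys.sum) = x - ys.sum - m := by ring
            rw [this]; exact hmem
          · refine Or.inr ⟨m :: ys, List.Sublist.cons₂ m hs, by simp, Or.inl ?_⟩
            rw [List.sum_cons]; omega
    · rintro (hx | ⟨ys, hs, hne, hcase⟩)
      · exact Or.inl ((pvMemStepA S m x).mpr (Or.inl hx))
      · rw [List.sublist_cons_iff] at hs
        rcases hs with hs | ⟨tl, rfl, htl⟩
        · rcases hcase with hsum | hmem
          · exact Or.inr ⟨ys, hs, hne, Or.inl hsum⟩
          · exact Or.inr ⟨ys, hs, hne,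
              Or.inr ((pvMemStepA S m _).mpr (Or.inl hmem))⟩
        · by_cases htlnil : tl = []
          · subst htlnil
            rcases hcase with hsum | hmem
            · exact Or.inl ((pvMemStepA S m x).mpr (Or.inr (Or.inr (by simpa using hsum.symm))))
            · exact Or.inl ((pvMemStepA S m x).mpr (Or.inr (Or.inl (by simpa using hmem))))
          · rcases hcase with hsum | hmem
            · refine Or.inr ⟨tl, htl, htlnil,
                Or.inr ((pvMemStepA S m _).mpr (Or.inr (Or.inr ?_)))⟩
              rw [List.sum_cons] at hsum; omega
            · refine Or.inr ⟨tl, htl, htlnil,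
                Or.inr ((pvMemStepA S m _).mpr (Or.inr (Or.inl ?_)))⟩
              rw [List.sum_cons] at hmem
              have : x - tl.sum - m = x - (m + tl.sum) := by ring
              rw [this]; exact hmem

lemma pvNodup_fold (ms : List Int) : ∀ S : PySem.Set Int, S.Nodup →
    (ms.foldl pvAStep S).Nodup := by
  induction ms with
  | nil => exact fun S h => h
  | cons m rest ih =>
    intro S h
    exact ih _ (PySem.Set.nodup_union _ _ h)

-- splitting a sublist of coins at the midpoint
lemma pvSublist_split (mid : Nat) (coins ys : List Int) :
    ys.Sublist coins ↔
      ∃ y1 y2 : List Int, ys = y1 ++ y2 ∧ y1.Sublist (coins.take mid) ∧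
        y2.Sublist (coins.drop mid) := by
  constructor
  · intro h
    rw [← List.take_append_drop mid coins] at h
    exact List.sublist_append_iff.mp h
  · rintro ⟨y1, y2, rfl, h1, h2⟩
    have := List.Sublist.append h1 h2
    rwa [List.take_append_drop] at this

-- membership in B's divide-and-conquer set: exactly the nonempty subset sums
lemma pvMem_sums_aux (n : Nat) : ∀ coins : List Int, coins.length ≤ n → ∀ x : Int,
    (x ∈ pvSums coins ↔ ∃ ys : List Int, ys.Sublist coins ∧ ys ≠ [] ∧ ys.sum = x) := by
  induction n with
  | zero =>
    intro coins hlen x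
    have h0 : coins = [] := List.length_eq_zero_iff.mp (by omega)
    rw [pvSums]
    simp [h0, PySem.Set.empty, List.sublist_nil]
  | succ n ih =>
    intro coins hlen x
    rw [pvSums]
    by_cases h0 : coins = []
    · simp [h0, PySem.Set.empty, List.sublist_nil]
    · rw [dif_neg h0]
      by_cases h1 : coins.length = 1
      · rw [dif_pos h1]
        obtain ⟨c, rfl⟩ := List.length_eq_one_iff.mp h1
        simp only [PySem.Set.mem_ofList, List.mem_singleton]
        constructor
        · rintro rfl
          exact ⟨[x], List.Sublist.refl _, by simp, by simp⟩
        · rintro ⟨ys, hs, hne, rfl⟩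
          rcases List.sublist_singleton.mp hs with rfl | rfl
          · exact absurd rfl hne
          · simp
      · rw [dif_neg h1]
        have hne0 : coins.length ≠ 0 := mt List.length_eq_zero_iff.mp h0
        simp only [pvMid, PySem.List.slice_to_natCast, PySem.List.slice_from_natCast]
        have hiz := ih (coins.take (coins.length / 2)) (by simp; omega)
        have hde := ih (coins.drop (coins.length / 2)) (by simp; omega)
        simp only [PySem.Set.mem_union, PySem.Set.mem_ofList, List.mem_flatMap,
          List.mem_map]
        constructor
        · rintro ((hx | hx) | ⟨a, ha, b, hb, rfl⟩)
          · obtain ⟨ys, hs, hne, hsum⟩ := (hiz x).mp hx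
            exact ⟨ys, hs.trans (List.take_sublist _ _), hne, hsum⟩
          · obtain ⟨ys, hs, hne, hsum⟩ := (hde x).mp hx
            exact ⟨ys, hs.trans (List.drop_sublist _ _), hne, hsum⟩
          · obtain ⟨y1, hs1, hne1, rfl⟩ := (hiz a).mp ha
            obtain ⟨y2, hs2, hne2, rfl⟩ := (hde b).mp hb
            exact ⟨y1 ++ y2,
              (pvSublist_split (coins.length / 2) coins _).mpr ⟨y1, y2, rfl, hs1, hs2⟩,
              by simp [hne1], by simp [List.sum_append]⟩
        · rintro ⟨ys, hs, hne, rfl⟩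
          obtain ⟨y1, y2, rfl, hs1, hs2⟩ :=
            (pvSublist_split (coins.length / 2) coins ys).mp hs
          by_cases hy1 : y1 = []
          · subst hy1
            exact Or.inl (Or.inr ((hde _).mpr ⟨y2, hs2, by simpa using hne, by simp⟩))
          · by_cases hy2 : y2 = []
            · subst hy2
              exact Or.inl (Or.inl ((hiz _).mpr ⟨y1, hs1, hy1, by simp⟩))
            · exact Or.inr ⟨y1.sum, (hiz _).mpr ⟨y1, hs1, hy1, rfl⟩,
                y2.sum, (hde _).mpr ⟨y2, hs2, hy2, rfl⟩, by simp [List.sum_append]⟩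

lemma pvNodup_sums_aux (n : Nat) : ∀ coins : List Int, coins.length ≤ n →
    (pvSums coins).Nodup := by
  induction n with
  | zero =>
    intro coins hlen
    have h0 : coins = [] := List.length_eq_zero_iff.mp (by omega)
    rw [pvSums]
    simp [h0, PySem.Set.empty]
  | succ n ih =>
    intro coins hlen
    rw [pvSums]
    by_cases h0 : coins = []
    · simp [h0, PySem.Set.empty]
    · rw [dif_neg h0]
      by_cases h1 : coins.length = 1
      · rw [dif_pos h1]
        exact PySem.Set.nodup_ofList _
      · rw [dif_neg h1]
        have hne0 : coins.length ≠ 0 := mt List.length_eq_zero_iff.mp h0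
        simp only [pvMid, PySem.List.slice_to_natCast, PySem.List.slice_from_natCast]
        exact PySem.Set.nodup_union _ _
          (PySem.Set.nodup_union _ _ (ih _ (by simp; omega)))

lemma pvCase_eq (monedas : List Int) :
    PySem.Set.len (pvACase monedas) = PySem.Set.len (pvSums monedas) := by
  have hperm : (pvACase monedas).Perm (pvSums monedas) := by
    unfold pvACase
    rw [List.perm_ext_iff_of_nodup
      (pvNodup_fold monedas PySem.Set.empty List.nodup_nil)
      (pvNodup_sums_aux monedas.length monedas (le_refl _))]
    intro x
    rw [pvMem_fold monedas PySem.Set.empty x,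
      pvMem_sums_aux monedas.length monedas (le_refl _) x]
    simp [PySem.Set.empty]
  simp [PySem.Set.len, hperm.length_eq]

-- ===== VERDICT (by name: the statement is the Claim_ definition above) =====
theorem calcular_valores_spec : Claim_equal_calcular_valores := by
  intro casos _
  unfold Spec_calcular_valores calcular_valores calcular_valores_alt
  have hA := PySem.List.foldl_append_singleton_eq_map
    (fun c : Int × List Int => PySem.Set.len (pvACase c.2)) casos ([] : List Int)
  have hB := PySem.List.foldl_append_singleton_eq_map
    (fun c : Int × List Int => PySem.Set.len (pvSums c.2)) casos ([] : List Int)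
  simp only [List.nil_append] at hA hB
  rw [hA, hB]
  exact List.map_congr_left (fun c _ => pvCase_eq c.2)
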